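-- pv_equiv track=rewrite | github.com/Prometh3uSss/calculo-numerico | src/utilidades/normalizador.py | normalizeBinaryNumber
-- ===== SOURCE A (Python) =====
-- def normalizeBinaryNumber(inputValue: str) -> str:
--     """
--     Normaliza un número binario a notación científica.
--     Ejemplos:
--     "101.01" -> "1.0101 × 2^2"
--     "-0.00101" -> "-1.01 × 2^{-3}"
--
--     Args:
--         inputValue: Cadena con número binario
--
--     Returns:
--         Representación en notación científica binaria
--     """
--     # Manejar signo
--     signCharacter = ''
--     if inputValue.startswith('-'):
--         signCharacter = '-'
--         processedValue = inputValue[1:]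
--     elif inputValue.startswith('+'):
--         processedValue = inputValue[1:]
--     else:
--         processedValue = inputValue
--
--     processedValue = processedValue.replace(',', '.')
--
--     # Caso especial: cero
--     if all(char in '0.,' for char in processedValue):
--         return "0"
--
--     # Dividir en parte entera y decimal
--     parts = processedValue.split('.')
--     integerPart = parts[0].lstrip('0') or '0'
--
--     if len(parts) > 1:
--         fractionalPart = parts[1]
--     else:
--         fractionalPart = ""
--
--     # Combinar dígitos significativos
--     significantDigits = integerPart + fractionalPart
--     significantDigits = significantDigits.lstrip('0') or '0'
--
--     if significantDigits == '0':
--         return "0"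
--
--     # Determinar exponente
--     if integerPart != '0':
--         exponentValue = len(integerPart) - 1
--         mantissaValue = significantDigits[0] + '.' + significantDigits[1:]
--     else:
--         for index, char in enumerate(fractionalPart):
--             if char != '0':
--                 exponentValue = -(index + 1)
--                 mantissaValue = fractionalPart[index] + '.' + fractionalPart[index+1:]
--                 break
--
--     # Limpiar mantisa
--     if '.' in mantissaValue:
--         mantissaValue = mantissaValue.rstrip('0').rstrip('.')
--
--     return f"{signCharacter}{mantissaValue} × 2^{exponentValue}"
-- ===== SOURCE B (Python) =====
-- def normalizeBinaryNumber(inputValue: str) -> str: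
--     """Normalize by shifting the radix point one digit at a time (a state
--     machine tracking (integer digit, fraction, exponent)), instead of locating
--     the first significant digit and branching on where it sits."""
--     sign = ''
--     s = inputValue
--     if s.startswith('-'):
--         sign, s = '-', s[1:]
--     elif s.startswith('+'):
--         s = s[1:]
--     s = s.replace(',', '.')
--     parts = s.split('.')
--     ip = parts[0]
--     fp = parts[1] if len(parts) > 1 else ''
--     exp = 0
--     # shift the point left one digit per step (repeatedly divide by 2)
--     while len(ip) > 1:
--         fp = ip[-1] + fp
--         ip = ip[:-1]
--         exp += 1
--     # shift the point right past leading zeros (repeatedly multiply by 2)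
--     while (ip == '' or ip == '0') and fp:
--         ip = fp[0]
--         fp = fp[1:]
--         exp -= 1
--     if ip == '' or ip == '0':
--         return "0"
--     mantissa = (ip + '.' + fp).rstrip('0').rstrip('.')
--     return f"{sign}{mantissa} × 2^{exp}"
-- ===== Notes on version B (the rewrite author's own statement) =====
-- stated objective: alternative
-- what changed: A's lstrip-based significant-digit bookkeeping and its two separate exponent/mantissa branches are replaced by a radix-point-shifting state machine: two while loops that move one digit at a time between the integer and fractional parts (dividing/multiplying by 2) while tracking the exponent, with no search for the first nonzero digit and no branch on where it sits.
import Mathlib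
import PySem

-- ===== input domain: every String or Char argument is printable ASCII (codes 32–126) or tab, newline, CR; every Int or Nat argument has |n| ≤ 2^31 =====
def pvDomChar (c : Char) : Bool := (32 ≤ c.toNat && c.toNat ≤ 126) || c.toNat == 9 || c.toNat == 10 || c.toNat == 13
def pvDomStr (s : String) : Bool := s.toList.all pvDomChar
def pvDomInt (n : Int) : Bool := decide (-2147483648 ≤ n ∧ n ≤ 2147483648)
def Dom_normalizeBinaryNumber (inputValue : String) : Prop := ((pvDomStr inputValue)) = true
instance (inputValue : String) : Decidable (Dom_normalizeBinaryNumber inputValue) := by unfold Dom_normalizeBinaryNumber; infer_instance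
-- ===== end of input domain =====

-- B replaces A's lstrip/branch search for the first significant digit by a radix-point-shifting
-- state machine (two loops moving one digit at a time while tracking the exponent);
-- same cost class (objective: alternative); return values proved equal on all inputs.

-- Python builtins both sources call and PySem does not provide; exact for single-character strip sets:
-- s.lstrip('0') drops exactly the leading '0' characters
def pyLstrip0 (cs : List Char) : List Char := cs.dropWhile (· == '0')
-- s.rstrip(c) (single char) drops exactly the trailing copies of c
def pyRstrip1 (cs : List Char) (c : Char) : List Char := (cs.reverse.dropWhile (· == c)).reverse

-- ===== PORT A =====
-- the 'for index, char in enumerate(fractionalPart): if char != '0': … break' loop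
def aFracLoop : List Char → Nat → Option (Int × List Char)
  | [], _ => none
  | c :: rest, idx => if c != '0' then some (-((idx : Int) + 1), c :: '.' :: rest) else aFracLoop rest (idx + 1)

-- everything after the sign handling and the ','→'.' replace
def normalizeBinaryNumberRestA (sign pv : List Char) : List Char :=
  -- if all(char in '0.,' for char in processedValue): return "0"
  if pv.all (fun c => c == '0' || c == '.' || c == ',') then ['0'] else
  let parts := PySem.Chars.splitOn pv ['.']
  -- integerPart = parts[0].lstrip('0') or '0'
  let ip0 := pyLstrip0 parts.headI
  let integerPart := if ip0 = [] then ['0'] else ip0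
  let fractionalPart := if parts.length > 1 then parts.getD 1 [] else []
  -- significantDigits = (integerPart + fractionalPart).lstrip('0') or '0'
  let sd0 := pyLstrip0 (integerPart ++ fractionalPart)
  let significantDigits := if sd0 = [] then ['0'] else sd0
  if significantDigits = ['0'] then ['0'] else
  let em : Int × List Char :=
    if integerPart ≠ ['0'] then
      -- significantDigits[0] is safe here: significantDigits ≠ '0' rules out the empty case
      ((integerPart.length : Int) - 1, significantDigits.headI :: '.' :: significantDigits.tail)
    else
      match aFracLoop fractionalPart 0 with
      | some r => r
      | none => (0, [])  -- unreachable (Python would hit UnboundLocalError); guarded by the significantDigits check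
  let mantissa := if PySem.Chars.isIn ['.'] em.2 then pyRstrip1 (pyRstrip1 em.2 '0') '.' else em.2
  sign ++ mantissa ++ " × 2^".toList ++ PySem.Int.toChars em.1

def normalizeBinaryNumberCore (cs : List Char) : List Char :=
  let sp : List Char × List Char :=
    if PySem.Chars.startswith cs ['-'] then (['-'], PySem.Chars.slice cs (some 1) none)
    else if PySem.Chars.startswith cs ['+'] then ([], PySem.Chars.slice cs (some 1) none)
    else ([], cs)
  normalizeBinaryNumberRestA sp.1 (PySem.Chars.replace sp.2 [','] ['.'])

def normalizeBinaryNumber (inputValue : String) : String :=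
  String.ofList (normalizeBinaryNumberCore inputValue.toList)

-- ===== PORT B =====
-- 'while len(ip) > 1: fp = ip[-1] + fp; ip = ip[:-1]; exp += 1'
def rightShift (ip fp : List Char) (e : Int) : List Char × List Char × Int :=
  if ip.length > 1 then rightShift ip.dropLast (ip.getLastD ' ' :: fp) (e + 1) else (ip, fp, e)
termination_by ip.length
decreasing_by simp [List.length_dropLast]; omega

-- 'while (ip == "" or ip == "0") and fp: ip = fp[0]; fp = fp[1:]; exp -= 1'
def leftShift : List Char → List Char → Int → List Char × List Char × Int
  | ip, [], e => (ip, [], e)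
  | ip, c :: rest, e => if ip = [] ∨ ip = ['0'] then leftShift [c] rest (e - 1) else (ip, c :: rest, e)

-- everything after the sign handling and the ','→'.' replace
def normalizeBinaryNumberRestB (sign pv : List Char) : List Char :=
  let parts := PySem.Chars.splitOn pv ['.']
  let st := rightShift parts.headI (if parts.length > 1 then parts.getD 1 [] else []) 0
  let st2 := leftShift st.1 st.2.1 st.2.2
  if st2.1 = [] ∨ st2.1 = ['0'] then ['0']
  else sign ++ pyRstrip1 (pyRstrip1 (st2.1 ++ '.' :: st2.2.1) '0') '.' ++ " × 2^".toList ++ PySem.Int.toChars st2.2.2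

def normalizeBinaryNumberAltCore (cs : List Char) : List Char :=
  let sp : List Char × List Char :=
    if PySem.Chars.startswith cs ['-'] then (['-'], PySem.Chars.slice cs (some 1) none)
    else if PySem.Chars.startswith cs ['+'] then ([], PySem.Chars.slice cs (some 1) none)
    else ([], cs)
  normalizeBinaryNumberRestB sp.1 (PySem.Chars.replace sp.2 [','] ['.'])

def normalizeBinaryNumber_alt (inputValue : String) : String :=
  String.ofList (normalizeBinaryNumberAltCore inputValue.toList)

-- ===== PRECONDITION & SPEC =====
def Spec_normalizeBinaryNumber (inputValue : String) (out : String) : Prop := out = normalizeBinaryNumber_alt inputValue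
instance (inputValue : String) (out : String) : Decidable (Spec_normalizeBinaryNumber inputValue out) := by unfold Spec_normalizeBinaryNumber; infer_instance

-- ===== CLAIM (what is proved, stated in full; the proofs are below) =====
def Claim_equal_normalizeBinaryNumber : Prop := ∀ (inputValue : String), Dom_normalizeBinaryNumber inputValue → Spec_normalizeBinaryNumber inputValue (normalizeBinaryNumber inputValue)

-- ===== LEMMAS AND PROOFS =====

-- proof-side model of str.split('.')
def mySplit : List Char → List (List Char)
  | [] => [[]]
  | c :: rest =>
    let ps := mySplit rest
    if c = '.' then [] :: ps else (c :: ps.headI) :: ps.tail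

-- common normal form both rests are reduced to: first-nonzero position in the combined digits
def restFormula (sign pv : List Char) : List Char :=
  let parts := mySplit pv
  let p0 := parts.headI
  let full := p0 ++ parts.getD 1 []
  match full.findIdx? (fun c => c != '0') with
  | none => ['0']
  | some i =>
    sign ++ pyRstrip1 (pyRstrip1 (full.getD i ' ' :: '.' :: full.drop (i + 1)) '0') '.'
      ++ " × 2^".toList ++ PySem.Int.toChars ((p0.length : Int) - 1 - (i : Int))

-- str.replace(',', '.') is the pointwise comma→dot map
def commaMap (c : Char) : Char := if c = ',' then '.' else c

theorem replace_go_comma (fuel : Nat) : ∀ (l acc : List Char), l.length ≤ fuel →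
    PySem.Chars.replace.go [','] ['.'] fuel l acc = acc.reverse ++ l.map commaMap := by
  induction fuel with
  | zero => intro l acc h; cases l with
    | nil => simp [PySem.Chars.replace.go]
    | cons c t => simp at h
  | succ f ih =>
    intro l acc h
    cases l with
    | nil => simp [PySem.Chars.replace.go]
    | cons c t =>
      by_cases hc : c = ','
      · subst hc
        rw [show PySem.Chars.replace.go [','] ['.'] (f+1) (',' :: t) acc
              = PySem.Chars.replace.go [','] ['.'] f t ('.' :: acc) by
            simp [PySem.Chars.replace.go, List.isPrefixOf]]
        rw [ih t ('.' :: acc) (by simpa using Nat.le_of_succ_le_succ h)]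
        simp [commaMap]
      · rw [show PySem.Chars.replace.go [','] ['.'] (f+1) (c :: t) acc
              = PySem.Chars.replace.go [','] ['.'] f t (c :: acc) by
            simp [PySem.Chars.replace.go, List.isPrefixOf]
            intro heq; exact absurd heq.symm hc]
        rw [ih t (c :: acc) (by simpa using Nat.le_of_succ_le_succ h)]
        simp [commaMap, hc]

theorem replace_comma (s : List Char) : PySem.Chars.replace s [','] ['.'] = s.map commaMap := by
  rw [PySem.Chars.replace, if_neg (by simp)]
  exact replace_go_comma s.length s [] (le_refl _)

theorem mySplit_ne_nil (l : List Char) : mySplit l ≠ [] := by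
  cases l with
  | nil => simp [mySplit]
  | cons c rest => simp only [mySplit]; split <;> simp [List.cons_ne_nil]

theorem exists_cons_mySplit (l : List Char) : ∃ h t, mySplit l = h :: t := by
  rcases hl : mySplit l with _ | ⟨h, t⟩
  · exact absurd hl (mySplit_ne_nil l)
  · exact ⟨h, t, rfl⟩

theorem splitOn_go_dot (fuel : Nat) : ∀ (l cur : List Char) (accs : List (List Char)), l.length < fuel →
    PySem.Chars.splitOn.go ['.'] fuel l cur accs =
      accs.reverse ++ (cur.reverse ++ (mySplit l).headI) :: (mySplit l).tail := by
  induction fuel with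
  | zero => intro l cur accs h; exact absurd h (Nat.not_lt_zero _)
  | succ f ih =>
    intro l cur accs h
    cases l with
    | nil => simp [PySem.Chars.splitOn.go, mySplit]
    | cons c t =>
      obtain ⟨ht, tt, hmt⟩ := exists_cons_mySplit t
      by_cases hc : c = '.'
      · subst hc
        rw [show PySem.Chars.splitOn.go ['.'] (f+1) ('.' :: t) cur accs
              = PySem.Chars.splitOn.go ['.'] f t [] (cur.reverse :: accs) by
            simp [PySem.Chars.splitOn.go, List.isPrefixOf]]
        rw [ih t [] (cur.reverse :: accs) (by simp at h ⊢; omega)]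
        simp [mySplit, hmt]
      · rw [show PySem.Chars.splitOn.go ['.'] (f+1) (c :: t) cur accs
              = PySem.Chars.splitOn.go ['.'] f t (c :: cur) accs by
            simp [PySem.Chars.splitOn.go, List.isPrefixOf]
            intro heq; exact absurd heq.symm hc]
        rw [ih t (c :: cur) accs (by simp at h ⊢; omega)]
        simp [mySplit, hmt, hc]

theorem splitOn_dot (pv : List Char) : PySem.Chars.splitOn pv ['.'] = mySplit pv := by
  obtain ⟨h, t, hmt⟩ := exists_cons_mySplit pv
  rw [PySem.Chars.splitOn, splitOn_go_dot (pv.length + 1) pv [] [] (by omega)]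
  simp [hmt]

theorem flatten_mySplit (pv : List Char) : (mySplit pv).flatten = pv.filter (fun c => !(c == '.')) := by
  induction pv with
  | nil => simp [mySplit]
  | cons c t ih =>
    obtain ⟨h, tt, hmt⟩ := exists_cons_mySplit t
    by_cases hc : c = '.'
    · simp [mySplit, hc, ih]
    · rw [show mySplit (c :: t) = (c :: (mySplit t).headI) :: (mySplit t).tail from by
          simp only [mySplit]; rw [if_neg hc]]
      rw [hmt, List.filter_cons, if_pos (by simp [hc])]
      simp only [List.headI_cons, List.tail_cons, List.flatten_cons, List.cons_append,
        List.cons.injEq, true_and]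
      rw [← ih, hmt, List.flatten_cons]

-- first non-'0' position vs lstrip('0')
theorem dropWhile_zero_of_findIdx? (xs : List Char) (i : Nat)
    (h : xs.findIdx? (fun c => c != '0') = some i) :
    xs.dropWhile (· == '0') = xs.drop i := by
  induction xs generalizing i with
  | nil => simp at h
  | cons c t ih =>
    rw [List.findIdx?_cons] at h
    by_cases hc : c = '0'
    · simp [hc] at h
      rcases h with ⟨j, hj, rfl⟩
      simp [hc, ih j hj]
    · simp [hc] at h
      subst h
      simp [hc]

theorem aFracLoop_spec (p1 : List Char) (j : Nat)
    (h : p1.findIdx? (fun c => c != '0') = some j) : ∀ (k : Nat),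
    aFracLoop p1 k = some (-(((k + j : Nat) : Int) + 1), p1.getD j ' ' :: '.' :: p1.drop (j + 1)) := by
  induction p1 generalizing j with
  | nil => simp at h
  | cons c t ih =>
    intro k
    rw [List.findIdx?_cons] at h
    by_cases hc : c = '0'
    · simp [hc] at h
      rcases h with ⟨j', hj', rfl⟩
      simp only [aFracLoop, hc]
      rw [if_neg (by simp)]
      rw [ih j' hj' (k + 1)]
      have hcast : ((k + 1 + j' : Nat) : Int) = ((k + (j' + 1) : Nat) : Int) := by push_cast; ring
      rw [hcast]
      simp
    · simp [hc] at h
      subst h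
      simp [aFracLoop, hc]

-- membership in the first two pieces comes from pv (and is never '.')
theorem mem_pieces_mem_pv (pv : List Char) (c : Char)
    (hm : c ∈ (mySplit pv).headI ∨ c ∈ (mySplit pv).getD 1 []) : c ∈ pv ∧ c ≠ '.' := by
  have hfl : c ∈ (mySplit pv).flatten := by
    obtain ⟨h, t, hmt⟩ := exists_cons_mySplit pv
    rw [hmt] at hm ⊢
    rcases hm with hm | hm
    · simp at hm; simp [hm]
    · cases t with
      | nil => simp at hm
      | cons q tt => simp at hm; simp [hm]
  rw [flatten_mySplit] at hfl
  have := List.of_mem_filter hfl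
  exact ⟨List.mem_of_mem_filter hfl, by simpa using this⟩

theorem frac_eq_getD (pv : List Char) :
    (if (mySplit pv).length > 1 then (mySplit pv).getD 1 [] else []) = (mySplit pv).getD 1 [] := by
  obtain ⟨h, t, hmt⟩ := exists_cons_mySplit pv
  cases t <;> simp [hmt]

-- ---- A's rest equals the normal form ----
theorem restA_formula (sign pv : List Char) (hc : (',' : Char) ∉ pv) :
    normalizeBinaryNumberRestA sign pv = restFormula sign pv := by
  unfold normalizeBinaryNumberRestA restFormula
  rw [splitOn_dot]
  simp only [frac_eq_getD]
  set p0 := (mySplit pv).headI with hp0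
  set p1 := (mySplit pv).getD 1 [] with hp1
  cases hf : (p0 ++ p1).findIdx? (fun c => c != '0') with
  | none =>
    have hall : ∀ x ∈ p0 ++ p1, x = '0' := by
      intro x hx
      have := List.findIdx?_eq_none_iff.mp hf x hx
      simpa using this
    have h1 : pyLstrip0 p0 = [] := by
      rw [pyLstrip0, List.dropWhile_eq_nil_iff]
      intro x hx; simp [hall x (List.mem_append_left _ hx)]
    have h2 : pyLstrip0 ('0' :: p1) = [] := by
      rw [pyLstrip0, List.dropWhile_eq_nil_iff]
      intro x hx
      rcases List.mem_cons.mp hx with hx | hx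
      · simp [hx]
      · simp [hall x (List.mem_append_right _ hx)]
    by_cases hz : (pv.all fun c => c == '0' || c == '.' || c == ',') = true
    · simp [hz]
    · simp only [Bool.not_eq_true] at hz
      simp [hz, h1, h2]
  | some i =>
    obtain ⟨hi, hpi, hbef⟩ := List.findIdx?_eq_some_iff_getElem.mp hf
    have hne0 : (p0 ++ p1)[i]'hi ≠ '0' := by simpa using hpi
    have hzf : (pv.all fun c => c == '0' || c == '.' || c == ',') = false := by
      have hxmem : (p0 ++ p1)[i]'hi ∈ p0 ++ p1 := List.getElem_mem hi
      obtain ⟨hmempv, hnd⟩ := mem_pieces_mem_pv pv _ (List.mem_append.mp hxmem)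
      rw [List.all_eq_false]
      refine ⟨_, hmempv, ?_⟩
      have hnc : (p0 ++ p1)[i]'hi ≠ ',' := fun h => hc (h ▸ hmempv)
      simp [hne0, hnd, hnc]
    rw [if_neg (by simp [hzf])]
    by_cases hip : i < p0.length
    · -- the first significant digit sits in the integer part: A takes the integer branch
      have hfi0 : p0.findIdx? (fun c => c != '0') = some i := by
        rw [List.findIdx?_append] at hf
        cases ho : p0.findIdx? (fun c => c != '0') with
        | none => rw [ho] at hf; simp at hf; omega
        | some i' => rw [ho] at hf; simp at hf; rw [hf]
      have hgeteq : (p0 ++ p1)[i]'hi = p0[i]'hip := List.getElem_append_left hip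
      have hne : p0[i]'hip ≠ '0' := hgeteq ▸ hne0
      have hdw : pyLstrip0 p0 = p0[i] :: p0.drop (i + 1) := by
        rw [pyLstrip0, dropWhile_zero_of_findIdx? p0 i hfi0, List.drop_eq_getElem_cons hip]
      have hipne : p0[i] :: p0.drop (i + 1) ≠ ['0'] := by
        intro h; injection h with h1 _; exact hne h1
      have hcomb : (p0[i] :: p0.drop (i + 1)) ++ p1 = (p0 ++ p1).drop i := by
        rw [← List.drop_eq_getElem_cons hip, List.drop_append,
          Nat.sub_eq_zero_of_le (le_of_lt hip), List.drop_zero]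
      have hdropfull : (p0 ++ p1).drop i = (p0 ++ p1)[i] :: (p0 ++ p1).drop (i + 1) :=
        List.drop_eq_getElem_cons hi
      have hsd : pyLstrip0 ((p0[i] :: p0.drop (i + 1)) ++ p1)
          = (p0 ++ p1)[i] :: (p0 ++ p1).drop (i + 1) := by
        rw [hcomb, hdropfull, pyLstrip0, List.dropWhile_cons, if_neg (by simp [hne0])]
      have hfne : (p0 ++ p1)[i] :: (p0 ++ p1).drop (i + 1) ≠ ['0'] := by
        intro h; injection h with h1 _; exact hne0 h1
      have hguard : PySem.Chars.isIn ['.']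
          ((p0 ++ p1)[i] :: '.' :: (p0 ++ p1).drop (i + 1)) = true :=
        (PySem.Chars.isIn_iff_infix _ _).mpr ((List.singleton_infix_iff _ _).mpr (by simp))
      have hexp : (((p0[i]'hip) :: p0.drop (i + 1)).length : Int) - 1
          = (p0.length : Int) - 1 - (i : Int) := by
        simp [List.length_drop]; omega
      simp only [hdw]
      rw [if_neg (List.cons_ne_nil _ _)]
      rw [hsd]
      rw [if_neg (List.cons_ne_nil _ _)]
      rw [if_neg hfne]
      rw [if_pos hipne]
      simp only [List.headI_cons, List.tail_cons]
      rw [if_pos hguard]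
      rw [List.getD_eq_getElem (p0 ++ p1) ' ' hi]
      rw [hexp]
    · -- the integer part is all zeros: A takes the fractional-loop branch
      rw [Nat.not_lt] at hip
      have hp0none : p0.findIdx? (fun c => c != '0') = none := by
        rw [List.findIdx?_eq_none_iff]
        intro x hx
        obtain ⟨j, hj, rfl⟩ := List.mem_iff_getElem.mp hx
        have hb := hbef j (lt_of_lt_of_le hj hip)
        rw [List.getElem_append_left hj] at hb
        simpa using hb
      have hj1 : p1.findIdx? (fun c => c != '0') = some (i - p0.length) := by
        rw [List.findIdx?_append, hp0none] at hf
        simp at hf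
        obtain ⟨j0, hj0, hji⟩ := hf
        have : i - p0.length = j0 := by omega
        rw [this]; exact hj0
      obtain ⟨hjlt, hpj, _⟩ := List.findIdx?_eq_some_iff_getElem.mp hj1
      have hall0 : ∀ x ∈ p0, x = '0' := fun x hx => by
        simpa using List.findIdx?_eq_none_iff.mp hp0none x hx
      have hdw0 : pyLstrip0 p0 = [] := by
        rw [pyLstrip0, List.dropWhile_eq_nil_iff]
        intro x hx; simp [hall0 x hx]
      have hsd : pyLstrip0 ('0' :: p1) = p1[i - p0.length] :: p1.drop (i - p0.length + 1) := by
        rw [pyLstrip0, List.dropWhile_cons, if_pos (by simp)]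
        rw [show p1.dropWhile (· == '0') = p1.drop (i - p0.length) from
          dropWhile_zero_of_findIdx? p1 _ hj1]
        exact List.drop_eq_getElem_cons hjlt
      have hnej : p1[i - p0.length]'hjlt ≠ '0' := by simpa using hpj
      have hsdne0 : p1[i - p0.length] :: p1.drop (i - p0.length + 1) ≠ ['0'] := by
        intro h; injection h with h1 _; exact hnej h1
      have hgeteq : (p0 ++ p1)[i]'hi = p1[i - p0.length]'hjlt := by
        rw [List.getElem_append_right hip]
      have hdrop2 : (p0 ++ p1).drop (i + 1) = p1.drop (i - p0.length + 1) := by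
        rw [List.drop_append, List.drop_eq_nil_of_le (by omega), List.nil_append]
        congr 1; omega
      have hguard : PySem.Chars.isIn ['.']
          (p1[i - p0.length] :: '.' :: p1.drop (i - p0.length + 1)) = true :=
        (PySem.Chars.isIn_iff_infix _ _).mpr ((List.singleton_infix_iff _ _).mpr (by simp))
      have hexp : -(((0 + (i - p0.length) : Nat) : Int) + 1) = (p0.length : Int) - 1 - (i : Int) := by
        omega
      rw [hdw0]
      rw [if_pos rfl]
      simp only [List.singleton_append]
      rw [hsd]
      rw [if_neg (List.cons_ne_nil _ _)]
      rw [if_neg hsdne0]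
      rw [if_neg (show ¬(['0'] : List Char) ≠ ['0'] from fun h => h rfl)]
      rw [aFracLoop_spec p1 (i - p0.length) hj1 0]
      simp only [List.getD_eq_getElem p1 ' ' hjlt]
      rw [if_pos hguard]
      rw [List.getD_eq_getElem (p0 ++ p1) ' ' hi]
      rw [hgeteq, hdrop2, hexp]

-- ---- characterizations of B's two shift loops ----
theorem rightShift_spec (ip : List Char) : ∀ (fp : List Char) (e : Int), ip ≠ [] →
    rightShift ip fp e = (ip.take 1, ip.drop 1 ++ fp, e + (ip.length : Int) - 1) := by
  induction ip using List.reverseRecOn with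
  | nil => intro fp e h; exact absurd rfl h
  | append_singleton l a ih =>
    intro fp e _
    cases l with
    | nil =>
      rw [rightShift]
      simp
    | cons c t =>
      rw [rightShift, if_pos (by simp)]
      rw [List.dropLast_concat, List.getLastD_concat]
      rw [ih (a :: fp) (e + 1) (List.cons_ne_nil _ _)]
      refine Prod.ext ?_ (Prod.ext ?_ ?_)
      · simp [List.take_append]
      · simp [List.drop_append]
      · simp; push_cast; ring

theorem leftShift_stay (ip fp : List Char) (e : Int) (h : ¬(ip = [] ∨ ip = ['0'])) :
    leftShift ip fp e = (ip, fp, e) := by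
  cases fp with
  | nil => rfl
  | cons c rest => simp only [leftShift]; rw [if_neg h]

theorem leftShift_find (fp : List Char) : ∀ (j : Nat) (e : Int) (ip : List Char),
    (ip = [] ∨ ip = ['0']) → fp.findIdx? (fun c => c != '0') = some j →
    leftShift ip fp e = ([fp.getD j ' '], fp.drop (j + 1), e - ((j : Int) + 1)) := by
  induction fp with
  | nil => intro j e ip _ h; simp at h
  | cons c rest ih =>
    intro j e ip hip h
    rw [List.findIdx?_cons] at h
    simp only [leftShift, if_pos hip]
    by_cases hc : c = '0'
    · simp [hc] at h
      rcases h with ⟨j', hj', rfl⟩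
      rw [ih j' (e - 1) [c] (Or.inr (by rw [hc])) hj']
      refine Prod.ext (by simp) (Prod.ext (by simp) ?_)
      simp; push_cast; ring
    · simp [hc] at h
      subst h
      rw [leftShift_stay [c] rest (e - 1) (by simp [hc])]
      simp

theorem leftShift_none (fp : List Char) : ∀ (e : Int) (ip : List Char),
    (ip = [] ∨ ip = ['0']) → fp.findIdx? (fun c => c != '0') = none →
    ((leftShift ip fp e).1 = [] ∨ (leftShift ip fp e).1 = ['0']) := by
  induction fp with
  | nil => intro e ip hip _; simpa [leftShift] using hip
  | cons c rest ih =>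
    intro e ip hip h
    have hc : c = '0' := by
      have := List.findIdx?_eq_none_iff.mp h c (List.mem_cons_self ..)
      simpa using this
    have hrest : rest.findIdx? (fun c => c != '0') = none := by
      rw [List.findIdx?_eq_none_iff]
      intro x hx
      exact List.findIdx?_eq_none_iff.mp h x (List.mem_cons_of_mem _ hx)
    simp only [leftShift, if_pos hip]
    exact ih (e - 1) [c] (Or.inr (by rw [hc])) hrest

-- ---- B's rest equals the normal form ----
theorem restB_formula (sign pv : List Char) :
    normalizeBinaryNumberRestB sign pv = restFormula sign pv := by
  unfold normalizeBinaryNumberRestB restFormula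
  rw [splitOn_dot]
  simp only [frac_eq_getD]
  set p1 := (mySplit pv).getD 1 [] with hp1
  cases hp : (mySplit pv).headI with
  | nil =>
    rw [show rightShift [] p1 0 = ([], p1, 0) from by rw [rightShift]; simp]
    simp only [List.nil_append]
    cases hf : p1.findIdx? (fun c => c != '0') with
    | none =>
      rw [if_pos (leftShift_none p1 0 [] (Or.inl rfl) hf)]
    | some j =>
      obtain ⟨hj, hpj, _⟩ := List.findIdx?_eq_some_iff_getElem.mp hf
      have hne : p1[j]'hj ≠ '0' := by simpa using hpj
      rw [leftShift_find p1 j 0 [] (Or.inl rfl) hf]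
      rw [if_neg (by
        simp only [List.getD_eq_getElem p1 ' ' hj]
        push_neg
        exact ⟨List.cons_ne_nil _ _, fun h => hne (by injection h)⟩)]
      have he : (0 : Int) - ((j : Int) + 1) = ((List.length ([] : List Char) : Int)) - 1 - (j : Int) := by
        simp; ring
      rw [he]
      rfl
  | cons c t =>
    rw [rightShift_spec (c :: t) p1 0 (List.cons_ne_nil _ _)]
    simp only [List.take_succ_cons, List.take_zero, List.drop_succ_cons, List.drop_zero]
    by_cases hc : c = '0'
    · subst hc
      cases hf : (t ++ p1).findIdx? (fun x => x != '0') with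
      | none =>
        rw [if_pos (leftShift_none (t ++ p1) _ ['0'] (Or.inr rfl) hf)]
        have hfull : (('0' :: t) ++ p1).findIdx? (fun x => x != '0') = none := by
          rw [List.cons_append, List.findIdx?_cons]
          simp [hf]
        rw [hfull]
      | some j =>
        obtain ⟨hj, hpj, _⟩ := List.findIdx?_eq_some_iff_getElem.mp hf
        have hne : (t ++ p1)[j]'hj ≠ '0' := by simpa using hpj
        rw [leftShift_find (t ++ p1) j _ ['0'] (Or.inr rfl) hf]
        rw [if_neg (by
          simp only [List.getD_eq_getElem (t ++ p1) ' ' hj]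
          push_neg
          exact ⟨List.cons_ne_nil _ _, fun h => hne (by injection h)⟩)]
        have hfull : (('0' :: t) ++ p1).findIdx? (fun x => x != '0') = some (j + 1) := by
          rw [List.cons_append, List.findIdx?_cons]
          simp [hf]
        rw [hfull]
        simp
    · rw [leftShift_stay [c] (t ++ p1) _ (by push_neg; exact ⟨List.cons_ne_nil _ _, fun h => hc (by injection h)⟩)]
      rw [if_neg (by push_neg; exact ⟨List.cons_ne_nil _ _, fun h => hc (by injection h)⟩)]
      have hfull : ((c :: t) ++ p1).findIdx? (fun x => x != '0') = some 0 := by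
        rw [List.cons_append, List.findIdx?_cons]
        simp [hc]
      rw [hfull]
      simp

theorem core_eq (cs : List Char) : normalizeBinaryNumberCore cs = normalizeBinaryNumberAltCore cs := by
  unfold normalizeBinaryNumberCore normalizeBinaryNumberAltCore
  rw [restB_formula]
  apply restA_formula
  rw [replace_comma]
  intro hmem
  rcases List.mem_map.mp hmem with ⟨c, _, hc⟩
  by_cases h0 : c = ',' <;> simp [commaMap, h0] at hc

-- ===== VERDICT (by name: the statement is the Claim_ definition above) =====
theorem normalizeBinaryNumber_spec : Claim_equal_normalizeBinaryNumber := by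
  intro s _
  unfold Spec_normalizeBinaryNumber normalizeBinaryNumber normalizeBinaryNumber_alt
  exact congrArg String.ofList (core_eq s.toList)
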